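-- pv_equiv track=rewrite | github.com/22AulnO/ShellFusion-backend | offline/mp_parser.py | extractRelatedCmds
-- ===== SOURCE A (Python) =====
-- def extractRelatedCmds(btext):
--     """
--     Extract related cmds from a <see also> bytes-text.
--     """
--     cmdname_cmdhtml_dict, s = {}, '<a href="../man'
--     ind = btext.find(s)
--     while ind != -1:
--         ind += len(s)
--         end = btext.find('">', ind)
--         cmdhtml = 'man' + btext[ind:end].strip()
--         ind = end + 2
--         end = btext.find('</a>', ind)
--         cmdname = btext[ind:end].strip()
--         cmdname_cmdhtml_dict[cmdname] = cmdhtml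
--         ind = btext.find(s, end)
--     return cmdname_cmdhtml_dict
-- ===== SOURCE B (Python) =====
-- import re
--
-- # One compiled pattern drives the whole extraction: the literal anchor prefix,
-- # a non-greedy group up to '">' (the html part) and a non-greedy group up to
-- # '</a>' (the name); DOTALL so the groups may span newlines, like str.find does.
-- _ANCHOR = re.compile(r'<a href="\.\./man(.*?)">(.*?)</a>', re.DOTALL)
--
-- def extractRelatedCmds(btext):
--     """
--     Extract related cmds from a <see also> bytes-text.
--     """
--     cmdname_cmdhtml_dict = {}
--     for m in _ANCHOR.finditer(btext):
--         cmdname_cmdhtml_dict[m.group(2).strip()] = 'man' + m.group(1).strip()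
--     return cmdname_cmdhtml_dict
-- ===== Notes on version B (the rewrite author's own statement) =====
-- stated objective: idiomatic
-- what changed: A's manual find/cursor while-loop with index arithmetic is replaced by one compiled regular expression (literal anchor prefix plus two non-greedy groups, DOTALL) iterated with re.finditer, filling the dict from the match groups.
-- outside the precondition, e.g. on extractRelatedCmds('<a href="../man'): A returns {'a href="../ma': 'man'}, B returns {}; on extractRelatedCmds('<a href="../manX'): A returns {'a href="../man': 'man'}, B returns {}; on extractRelatedCmds('<a href="../man1">ls'): A returns {'l': 'man1'}, B returns {}
import Mathlib
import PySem

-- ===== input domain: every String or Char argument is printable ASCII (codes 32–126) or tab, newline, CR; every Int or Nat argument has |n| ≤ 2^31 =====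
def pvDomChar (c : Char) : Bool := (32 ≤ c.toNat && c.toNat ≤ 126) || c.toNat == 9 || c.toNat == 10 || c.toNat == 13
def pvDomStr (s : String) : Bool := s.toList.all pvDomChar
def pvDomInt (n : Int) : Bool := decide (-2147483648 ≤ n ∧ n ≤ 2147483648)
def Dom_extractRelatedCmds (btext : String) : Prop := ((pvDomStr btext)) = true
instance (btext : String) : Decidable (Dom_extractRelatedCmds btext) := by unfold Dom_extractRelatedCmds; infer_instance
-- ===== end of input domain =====

-- B replaces A's manual find/cursor while-loop by one compiled regex with two non-greedy groups iterated via
-- re.finditer (idiomatic); equivalence is claimed on well-formed texts (Pre_ below) where every anchor is closed.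

-- the literal substrings of the Python source / pattern
def pvMark : List Char := ['<', 'a', ' ', 'h', 'r', 'e', 'f', '=', '"', '.', '.', '/', 'm', 'a', 'n']
def pvT1 : List Char := ['"', '>']
def pvT2 : List Char := ['<', '/', 'a', '>']

-- ===== PORT A =====
-- the while-loop of A; fuel (length+1) only bounds the iteration count, each well-formed iteration consumes ≥ 17 chars
def pvGoA : Nat → List Char → Int → PySem.Dict String String → PySem.Dict String String
  | 0, _, _, d => d
  | fuel+1, cs, p, d =>
    let ind0 := PySem.Chars.findFrom cs pvMark p
    if ind0 = -1 then d
    else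
      let ind := ind0 + (pvMark.length : Int)
      let e1 := PySem.Chars.findFrom cs pvT1 ind
      let cmdhtml := "man".toList ++ PySem.Chars.strip (PySem.Chars.slice cs (some ind) (some e1))
      let p2 := e1 + 2
      let e2 := PySem.Chars.findFrom cs pvT2 p2
      let cmdname := PySem.Chars.strip (PySem.Chars.slice cs (some p2) (some e2))
      pvGoA fuel cs e2 (d.insert (String.ofList cmdname) (String.ofList cmdhtml))

def extractRelatedCmds (btext : String) : List (String × String) :=
  (pvGoA (btext.toList.length + 1) btext.toList 0 PySem.Dict.empty).items

-- ===== PORT B =====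
-- hand-port of re.finditer for the fixed pattern r'<a href="\.\./man(.*?)">(.*?)</a>' (DOTALL): the engine tries
-- each start position in turn; a match requires the literal prefix, then group 1 ends at the first '">' after it
-- and group 2 at the first '</a>' after that (non-greedy; exact for this pattern: a '</a>' completing a later '">'
-- would also complete the first one, so no backtracking over group 1 can occur); the scan resumes at the match end.
-- Fuel length+1 only bounds the scan: the position strictly increases each step.
def pvGoB : Nat → List Char → Nat → PySem.Dict String String → PySem.Dict String String
  | 0, _, _, d => d
  | fuel+1, cs, p, d =>
    if p < cs.length then
      if pvMark <+: cs.drop p then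
        let j := PySem.Chars.findFrom cs pvT1 ((p : Int) + 15)
        if j = -1 then d
        else
          let q := PySem.Chars.findFrom cs pvT2 (j + 2)
          if q = -1 then d
          else
            pvGoB fuel cs (q + 4).toNat
              (d.insert (String.ofList (PySem.Chars.strip (PySem.Chars.slice cs (some (j + 2)) (some q))))
                        (String.ofList ("man".toList ++ PySem.Chars.strip (PySem.Chars.slice cs (some ((p : Int) + 15)) (some j)))))
      else pvGoB fuel cs (p + 1) d
    else d

def extractRelatedCmds_alt (btext : String) : List (String × String) :=
  (pvGoB (btext.toList.length + 1) btext.toList 0 PySem.Dict.empty).items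

-- ===== PRECONDITION & SPEC =====
-- Pre_ excludes malformed texts in which some occurrence of the anchor prefix is not followed by the quote-bracket
-- terminator and then by a closing anchor tag: there A's cursor fall-through (end == -1) yields accidental
-- garbage entries or even an infinite loop, while B simply finds no further regex match; A's behaviour there is an
-- implementation artefact.
def Pre_extractRelatedCmds (btext : String) : Prop :=
  ∀ i : Nat, i < btext.toList.length → pvMark <+: btext.toList.drop i →
    PySem.Chars.findFrom btext.toList pvT1 ((i : Int) + 15) ≠ -1 ∧
    PySem.Chars.findFrom btext.toList pvT2
      (PySem.Chars.findFrom btext.toList pvT1 ((i : Int) + 15) + 2) ≠ -1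

instance (btext : String) : Decidable (Pre_extractRelatedCmds btext) := by
  unfold Pre_extractRelatedCmds; infer_instance

def pvWitness_extractRelatedCmds : String := "<a href=\"../man1\">ls</a>"

def Spec_extractRelatedCmds (btext : String) (out : List (String × String)) : Prop := out = extractRelatedCmds_alt btext
instance (btext : String) (out : List (String × String)) : Decidable (Spec_extractRelatedCmds btext out) := by unfold Spec_extractRelatedCmds; infer_instance

-- ===== CLAIM (what is proved, stated in full; the proofs are below) =====
def Claim_equal_extractRelatedCmds : Prop := ∀ (btext : String), Dom_extractRelatedCmds btext → Pre_extractRelatedCmds btext → Spec_extractRelatedCmds btext (extractRelatedCmds btext)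

-- ===== LEMMAS AND PROOFS =====

-- a prefix of a later suffix is an infix of an earlier suffix
lemma pv_infix_of_prefix_drop (cs sub : List Char) (k t : Nat) (hk : k ≤ t)
    (h : sub <+: cs.drop t) : sub <:+: cs.drop k := by
  have h2 : sub <+: (cs.drop k).drop (t - k) := by
    rw [List.drop_drop]
    have e : k + (t - k) = t := by omega
    rw [e]; exact h
  exact h2.isInfix.trans (List.drop_suffix _ _).isInfix

-- find on a suffix, characterised by the first occurrence at or after b
lemma pv_find_first (cs sub : List Char) (b j : Nat) (hbj : b ≤ j)
    (hpre : sub <+: cs.drop j) (hmin : ∀ j', b ≤ j' → j' < j → ¬ sub <+: cs.drop j') :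
    PySem.Chars.find (cs.drop b) sub = ((j - b : Nat) : Int) := by
  have hinf : sub <:+: cs.drop b := pv_infix_of_prefix_drop cs sub b j hbj hpre
  have h0 : 0 ≤ PySem.Chars.find (cs.drop b) sub := (PySem.Chars.find_nonneg_iff _ _).mpr hinf
  obtain ⟨hp, hm⟩ := PySem.Chars.find_spec h0
  rw [List.drop_drop] at hp
  have h1 : ¬ (b + (PySem.Chars.find (cs.drop b) sub).toNat < j) := fun hlt =>
    hmin _ (by omega) hlt hp
  have h2 : ¬ (j < b + (PySem.Chars.find (cs.drop b) sub).toNat) := by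
    intro hlt
    refine hm (j - b) (by omega) ?_
    rw [List.drop_drop]
    have e : b + (j - b) = j := by omega
    rw [e]; exact hpre
  have h3 : (PySem.Chars.find (cs.drop b) sub).toNat = j - b := by omega
  rw [← Int.toNat_of_nonneg h0, h3]

-- findFrom is unchanged when no occurrence starts in [k, k')
lemma pv_findFrom_gap (cs sub : List Char) (k k' : Nat) (hkk : k ≤ k') (hk' : k' ≤ cs.length)
    (hgap : ∀ i : Nat, k ≤ i → i < k' → ¬ sub <+: cs.drop i) :
    PySem.Chars.findFrom cs sub (k : Int) = PySem.Chars.findFrom cs sub (k' : Int) := by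
  have hk : k ≤ cs.length := le_trans hkk hk'
  rw [PySem.Chars.findFrom_natCast cs sub k hk, PySem.Chars.findFrom_natCast cs sub k' hk']
  by_cases hF : PySem.Chars.find (cs.drop k') sub = -1
  · have hno' : ¬ sub <:+: cs.drop k' := (PySem.Chars.find_eq_neg_one_iff _ _).mp hF
    have h0 : PySem.Chars.find (cs.drop k) sub = -1 := by
      rw [PySem.Chars.find_eq_neg_one_iff]
      intro hc
      have hex : ∃ j, sub <+: (cs.drop k).drop j :=
        (PySem.Chars.exists_prefix_drop_iff_isIn sub (cs.drop k)).mpr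
          ((PySem.Chars.isIn_iff_infix sub (cs.drop k)).mpr hc)
      obtain ⟨j, hj⟩ := hex
      rw [List.drop_drop] at hj
      by_cases hlt : k + j < k'
      · exact hgap (k + j) (by omega) hlt hj
      · exact hno' (pv_infix_of_prefix_drop cs sub k' (k + j) (by omega) hj)
    rw [h0, hF]; simp
  · have hFnn : 0 ≤ PySem.Chars.find (cs.drop k') sub := by
      have := PySem.Chars.neg_one_le_find (cs.drop k') sub; omega
    have hpre' : sub <+: cs.drop (k' + (PySem.Chars.find (cs.drop k') sub).toNat) := by
      have := (PySem.Chars.find_spec hFnn).1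
      rwa [List.drop_drop] at this
    have hmin' := (PySem.Chars.find_spec hFnn).2
    set f' := (PySem.Chars.find (cs.drop k') sub).toNat with hf'
    have hfind_k : PySem.Chars.find (cs.drop k) sub = ((k' + f' - k : Nat) : Int) := by
      refine pv_find_first cs sub k (k' + f') (by omega) hpre' ?_
      intro j' hj1 hj2 hj3
      by_cases hlt : j' < k'
      · exact hgap j' hj1 hlt hj3
      · refine hmin' (j' - k') (by omega) ?_
        rw [List.drop_drop]
        have e : k' + (j' - k') = j' := by omega
        rw [e]; exact hj3
    have hfind_k' : PySem.Chars.find (cs.drop k') sub = ((f' : Nat) : Int) :=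
      (Int.toNat_of_nonneg hFnn).symm
    rw [hfind_k, hfind_k']
    rw [if_neg (by omega), if_neg (by omega)]
    omega

-- the anchor prefix cannot start inside the 4 characters of '</a>'
lemma pv_no_mark_in_t2 (cs : List Char) (q : Nat) (h : pvT2 <+: cs.drop q) :
    ∀ i : Nat, q ≤ i → i < q + 4 → ¬ pvMark <+: cs.drop i := by
  obtain ⟨tl, htl⟩ := h
  have hbase : cs.drop q = '<' :: '/' :: 'a' :: '>' :: tl := by
    rw [← htl]; rfl
  intro i h1 h2 hpref
  obtain ⟨u, hu⟩ := hpref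
  have hi : i = q ∨ i = q + 1 ∨ i = q + 2 ∨ i = q + 3 := by omega
  have hd1 : List.drop (q + 1) cs = '/' :: 'a' :: '>' :: tl := by
    rw [show q + 1 = q + 1 from rfl, ← List.drop_drop, hbase]; rfl
  have hd2 : List.drop (q + 2) cs = 'a' :: '>' :: tl := by
    rw [show q + 2 = q + 2 from rfl, ← List.drop_drop, hbase]; rfl
  have hd3 : List.drop (q + 3) cs = '>' :: tl := by
    rw [show q + 3 = q + 3 from rfl, ← List.drop_drop, hbase]; rfl
  rcases hi with h | h | h | h <;> subst h
  · rw [hbase] at hu; simp [pvMark] at hu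
  · rw [hd1] at hu; simp [pvMark] at hu
  · rw [hd2] at hu; simp [pvMark] at hu
  · rw [hd3] at hu; simp [pvMark] at hu

-- when no anchor prefix occurs at or after k, A returns the dict unchanged (any fuel)
lemma pv_A_done (cs : List Char) (k : Nat) (hk : k ≤ cs.length)
    (hgap : ∀ i : Nat, k ≤ i → ¬ pvMark <+: cs.drop i) :
    ∀ fuelA d, pvGoA fuelA cs (k : Int) d = d := by
  have hF : PySem.Chars.findFrom cs pvMark (k : Int) = -1 := by
    rw [PySem.Chars.findFrom_natCast cs pvMark k hk]
    have h0 : PySem.Chars.find (cs.drop k) pvMark = -1 := by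
      rw [PySem.Chars.find_eq_neg_one_iff]
      intro hc
      have hex : ∃ j, pvMark <+: (cs.drop k).drop j :=
        (PySem.Chars.exists_prefix_drop_iff_isIn pvMark (cs.drop k)).mpr
          ((PySem.Chars.isIn_iff_infix pvMark (cs.drop k)).mpr hc)
      obtain ⟨j, hj⟩ := hex
      rw [List.drop_drop] at hj
      exact hgap (k + j) (by omega) hj
    rw [if_pos h0]
  intro fuelA d
  cases fuelA with
  | zero => rfl
  | succ fa => simp only [pvGoA]; rw [hF]; simp

-- the main correspondence: B's character-by-character regex scan from p equals A's find-jump loop from k,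
-- provided no anchor starts in [k, p) and both have enough fuel
lemma pv_goBA (cs : List Char)
    (hPre : ∀ i : Nat, i < cs.length → pvMark <+: cs.drop i →
      PySem.Chars.findFrom cs pvT1 ((i : Int) + 15) ≠ -1 ∧
      PySem.Chars.findFrom cs pvT2 (PySem.Chars.findFrom cs pvT1 ((i : Int) + 15) + 2) ≠ -1) :
    ∀ (fuelB : Nat) (p k fuelA : Nat) (d : PySem.Dict String String), k ≤ p → k ≤ cs.length →
      cs.length + 1 ≤ p + fuelB → cs.length + 1 ≤ k + fuelA →
      (∀ i : Nat, k ≤ i → i < p → ¬ pvMark <+: cs.drop i) →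
      pvGoB fuelB cs p d = pvGoA fuelA cs (k : Int) d := by
  intro fuelB
  induction fuelB with
  | zero =>
    intro p k fuelA d hkp hkl hpf _ hgap
    have hA := pv_A_done cs k (by omega)
      (fun i h1 hp => by
        by_cases hlt : i < p
        · exact hgap i h1 hlt hp
        · have := hp.length_le
          have h15 : pvMark.length = 15 := by rfl
          rw [h15, List.length_drop] at this
          omega)
    rw [hA]; rfl
  | succ fuel IH =>
    intro p k fuelA d hkp hkl hpf hkf hgap
    by_cases hp : p < cs.length
    · by_cases hm : pvMark <+: cs.drop p
      · -- a match at p: both sides consume it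
        cases fuelA with
        | zero => omega
        | succ fa =>
          have hlen15 : p + 15 ≤ cs.length := by
            have h1 := hm.length_le
            have h2 : pvMark.length = 15 := by rfl
            rw [h2, List.length_drop] at h1; omega
          have hind0 : PySem.Chars.findFrom cs pvMark (k : Int) = ((p : Nat) : Int) := by
            rw [pv_findFrom_gap cs pvMark k p hkp (by omega) hgap,
              PySem.Chars.findFrom_natCast cs pvMark p (by omega)]
            have h0 : PySem.Chars.find (cs.drop p) pvMark = ((0 : Nat) : Int) := by
              have := pv_find_first cs pvMark p p (le_refl p) hm (by omega)
              simpa using this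
            rw [h0]
            simp
          obtain ⟨hP1, hP2⟩ := hPre p hp hm
          have hcast1 : (((p : Nat) : Int) + 15) = ((p + 15 : Nat) : Int) := by push_cast; ring
          rw [hcast1] at hP1 hP2
          rw [PySem.Chars.findFrom_natCast cs pvT1 (p + 15) hlen15] at hP1 hP2
          have hG : PySem.Chars.find (cs.drop (p + 15)) pvT1 ≠ -1 := by
            intro hc; rw [if_pos hc] at hP1; exact hP1 rfl
          rw [if_neg hG] at hP1 hP2
          have hGnn : 0 ≤ PySem.Chars.find (cs.drop (p + 15)) pvT1 := by
            have := PySem.Chars.neg_one_le_find (cs.drop (p + 15)) pvT1; omega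
          set g := (PySem.Chars.find (cs.drop (p + 15)) pvT1).toNat with hgdef
          have hGg : PySem.Chars.find (cs.drop (p + 15)) pvT1 = (g : Int) :=
            (Int.toNat_of_nonneg hGnn).symm
          have ht1pre : pvT1 <+: cs.drop (p + 15 + g) := by
            have := (PySem.Chars.find_spec hGnn).1
            rwa [List.drop_drop] at this
          have hlenj2 : p + 15 + g + 2 ≤ cs.length := by
            have h1 := ht1pre.length_le
            have h2 : pvT1.length = 2 := by rfl
            rw [h2, List.length_drop] at h1; omega
          have he1 : PySem.Chars.findFrom cs pvT1 (((p : Nat) : Int) + 15)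
              = ((p + 15 + g : Nat) : Int) := by
            rw [hcast1, PySem.Chars.findFrom_natCast cs pvT1 (p + 15) hlen15, if_neg hG, hGg]
            push_cast; ring
          have hcast2 : (((p + 15 : Nat) : Int) + PySem.Chars.find (cs.drop (p + 15)) pvT1 + 2)
              = ((p + 15 + g + 2 : Nat) : Int) := by rw [hGg]; push_cast; ring
          rw [hcast2, PySem.Chars.findFrom_natCast cs pvT2 (p + 15 + g + 2) hlenj2] at hP2
          have hH : PySem.Chars.find (cs.drop (p + 15 + g + 2)) pvT2 ≠ -1 := by
            intro hc; rw [if_pos hc] at hP2; exact hP2 rfl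
          have hHnn : 0 ≤ PySem.Chars.find (cs.drop (p + 15 + g + 2)) pvT2 := by
            have := PySem.Chars.neg_one_le_find (cs.drop (p + 15 + g + 2)) pvT2; omega
          set r := (PySem.Chars.find (cs.drop (p + 15 + g + 2)) pvT2).toNat with hrdef
          have hHr : PySem.Chars.find (cs.drop (p + 15 + g + 2)) pvT2 = (r : Int) :=
            (Int.toNat_of_nonneg hHnn).symm
          have ht2pre : pvT2 <+: cs.drop (p + 15 + g + 2 + r) := by
            have := (PySem.Chars.find_spec hHnn).1
            rwa [List.drop_drop] at this
          have hlenq4 : p + 15 + g + 2 + r + 4 ≤ cs.length := by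
            have h1 := ht2pre.length_le
            have h2 : pvT2.length = 4 := by rfl
            rw [h2, List.length_drop] at h1; omega
          have he2 : PySem.Chars.findFrom cs pvT2 (((p + 15 + g : Nat) : Int) + 2)
              = ((p + 15 + g + 2 + r : Nat) : Int) := by
            have e : (((p + 15 + g : Nat) : Int) + 2) = ((p + 15 + g + 2 : Nat) : Int) := by
              push_cast; ring
            rw [e, PySem.Chars.findFrom_natCast cs pvT2 (p + 15 + g + 2) hlenj2, if_neg hH, hHr]
            push_cast; ring
          -- reduce the A side one step
          have hAred : pvGoA (fa + 1) cs (k : Int) d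
              = pvGoA fa cs ((p + 15 + g + 2 + r : Nat) : Int)
                  (d.insert
                    (String.ofList (PySem.Chars.strip (PySem.Chars.slice cs
                      (some (((p + 15 + g : Nat) : Int) + 2)) (some ((p + 15 + g + 2 + r : Nat) : Int)))))
                    (String.ofList ("man".toList ++ PySem.Chars.strip (PySem.Chars.slice cs
                      (some (((p : Nat) : Int) + 15)) (some ((p + 15 + g : Nat) : Int)))))) := by
            simp only [pvGoA]
            rw [hind0, if_neg (by omega : ¬ ((p : Nat) : Int) = -1)]
            have hml : (pvMark.length : Int) = 15 := by rfl
            rw [hml, he1, he2]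
          -- reduce the B side one step
          have hBred : pvGoB (fuel + 1) cs p d
              = pvGoB fuel cs (p + 15 + g + 2 + r + 4)
                  (d.insert
                    (String.ofList (PySem.Chars.strip (PySem.Chars.slice cs
                      (some (((p + 15 + g : Nat) : Int) + 2)) (some ((p + 15 + g + 2 + r : Nat) : Int)))))
                    (String.ofList ("man".toList ++ PySem.Chars.strip (PySem.Chars.slice cs
                      (some (((p : Nat) : Int) + 15)) (some ((p + 15 + g : Nat) : Int)))))) := by
            simp only [pvGoB]
            rw [if_pos hp, if_pos hm, he1,
              if_neg (by omega : ¬ ((p + 15 + g : Nat) : Int) = -1), he2,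
              if_neg (by omega : ¬ ((p + 15 + g + 2 + r : Nat) : Int) = -1)]
            have hq4 : (((p + 15 + g + 2 + r : Nat) : Int) + 4).toNat = p + 15 + g + 2 + r + 4 := by
              omega
            rw [hq4]
          rw [hAred, hBred]
          exact IH (p + 15 + g + 2 + r + 4) (p + 15 + g + 2 + r) fa _ (by omega)
            (by omega) (by omega) (by omega)
            (pv_no_mark_in_t2 cs (p + 15 + g + 2 + r) ht2pre)
      · -- no match at p: B advances by one character
        have hB : pvGoB (fuel + 1) cs p d = pvGoB fuel cs (p + 1) d := by
          simp only [pvGoB]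
          rw [if_pos hp, if_neg hm]
        rw [hB]
        exact IH (p + 1) k fuelA d (by omega) hkl (by omega) hkf
          (fun i h1 h2 => by
            by_cases hlt : i < p
            · exact hgap i h1 hlt
            · have : i = p := by omega
              rw [this]; exact hm)
    · -- scan past the end: B stops, A finds nothing
      have hB : pvGoB (fuel + 1) cs p d = d := by
        simp only [pvGoB]; rw [if_neg hp]
      rw [hB]
      exact (pv_A_done cs k (by omega)
        (fun i h1 hpre => by
          by_cases hlt : i < p
          · exact hgap i h1 hlt hpre
          · have := hpre.length_le
            have h15 : pvMark.length = 15 := by rfl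
            rw [h15, List.length_drop] at this
            omega) fuelA d).symm

-- ===== VERDICT (by name: the statement is the Claim_ definition above) =====
theorem extractRelatedCmds_spec : Claim_equal_extractRelatedCmds := by
  intro btext _ hPre
  unfold Spec_extractRelatedCmds extractRelatedCmds extractRelatedCmds_alt
  have h := pv_goBA btext.toList hPre (btext.toList.length + 1) 0 0 (btext.toList.length + 1)
    PySem.Dict.empty (le_refl 0) (by omega) (by omega) (by omega) (by omega)
  simpa using congrArg PySem.Dict.items h.symm
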